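-- pv_equiv track=rewrite | github.com/ryrobes/larsql | rvbbit/rvbbit/semantic_sql/fingerprint.py | normalized_fingerprint
-- ===== SOURCE A (Python) =====
-- def normalized_fingerprint(value: str) -> str:
--     """
--     Compute normalized character-class fingerprint.
--
--     Collapses runs of same character class:
--     - D = digit
--     - L = letter
--     - _ = whitespace
--     - punctuation preserved as-is
--
--     Examples:
--         "(555) 123-4567" → "(D)_D-D"
--         "John Smith"     → "L_L"
--         "2024-01-15"     → "D-D-D"
--         "$1,234.56"      → "$D,D.D"
--         "user@example.com" → "L@L.L"
--
--     Args:
--         value: The string to fingerprint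
--
--     Returns:
--         Collapsed character-class fingerprint
--     """
--     if not value:
--         return ""
--
--     result = []
--     prev_class = None
--
--     for char in value:
--         if char.isdigit():
--             char_class = 'D'
--         elif char.isalpha():
--             char_class = 'L'
--         elif char.isspace():
--             char_class = '_'
--         else:
--             # Preserve punctuation literally (important for format distinction)
--             char_class = char
--
--         # Only append if different from previous (collapse runs)
--         if char_class != prev_class:
--             result.append(char_class)
--             prev_class = char_class
--
--     return ''.join(result)
-- ===== SOURCE B (Python) =====
-- import re
--
-- # Tokenize into maximal runs of one output class in a single regex pass
-- # (digits, letters, whitespace-or-underscore, or a repeated identical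
-- # punctuation char), then emit one class character per token.
-- _TOKEN = re.compile(r'[0-9]+|[A-Za-z]+|[ \t\n\x0b\x0c\r_]+|(.)\1*', re.DOTALL)
--
--
-- def normalized_fingerprint(value: str) -> str:
--     out = []
--     for m in _TOKEN.finditer(value):
--         c = m.group(0)[0]
--         if '0' <= c <= '9':
--             out.append('D')
--         elif 'A' <= c <= 'Z' or 'a' <= c <= 'z':
--             out.append('L')
--         elif c in ' \t\n\x0b\x0c\r_':
--             out.append('_')
--         else:
--             out.append(c)
--     return ''.join(out)
-- ===== Notes on version B (the rewrite author's own statement) =====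
-- stated objective: faster
-- what changed: B tokenizes the string with one compiled regex into maximal runs of a single output class (digits, letters, whitespace-or-underscore, repeated identical punctuation) and emits one class character per token, instead of A's per-character Python loop that maintains prev_class state and appends on change.
import Mathlib
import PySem

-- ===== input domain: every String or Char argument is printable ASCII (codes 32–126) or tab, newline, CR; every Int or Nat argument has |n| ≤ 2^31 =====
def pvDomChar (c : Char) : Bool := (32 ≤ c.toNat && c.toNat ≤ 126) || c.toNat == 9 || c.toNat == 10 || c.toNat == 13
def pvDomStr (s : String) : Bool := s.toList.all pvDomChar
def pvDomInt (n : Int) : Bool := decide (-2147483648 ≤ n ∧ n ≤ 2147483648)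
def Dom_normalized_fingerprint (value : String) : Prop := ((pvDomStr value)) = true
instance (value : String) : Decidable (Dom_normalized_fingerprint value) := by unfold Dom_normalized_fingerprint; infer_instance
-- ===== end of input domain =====

-- B replaces A's prev_class character loop by a regex-style tokenizer: the string is split into maximal runs of one output class and each token yields one class character (alternative decomposition; return value only, no mutation involved).


-- ===== PORT A =====
-- A's loop: structural recursion over the chars carrying (result, prev_class), classification inlined as in A.
def nfLoopA : List Char → List Char → Option Char → List Char
  | [], result, _ => result
  | c :: rest, result, prev =>
    let char_class : Char :=
      if PySem.Chars.isdigit c then 'D'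
      else if PySem.Chars.isalpha c then 'L'
      else if PySem.Chars.isspace c then '_'
      else c
    if some char_class ≠ prev then nfLoopA rest (result ++ [char_class]) (some char_class)
    else nfLoopA rest result prev

def normalized_fingerprint (value : String) : String :=
  if value.toList = [] then ""
  else String.mk (nfLoopA value.toList [] none)

-- ===== PORT B =====
-- Source B classifies a token by its first char with explicit ASCII ranges ('0'..'9', 'A'..'Z'/'a'..'z', the whitespace-or-underscore set); ported literally.
def nfClassB (c : Char) : Char :=
  if '0' ≤ c ∧ c ≤ '9' then 'D'
  else if ('A' ≤ c ∧ c ≤ 'Z') ∨ ('a' ≤ c ∧ c ≤ 'z') then 'L'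
  else if c = ' ' ∨ c = '\t' ∨ c = '\n' ∨ c = '\x0b' ∨ c = '\x0c' ∨ c = '\r' ∨ c = '_' then '_'
  else c

-- Source B's regex finditer, ported by hand: each match of _TOKEN is the maximal run of
-- characters sharing one output class (for the punctuation alternative `(.)\1*`, a run of one
-- identical char, which is exactly a run of equal nfClassB value since distinct punctuation
-- chars have distinct classes); exact on the ASCII domain. One class char is emitted per token.
def nfTokens : List Char → List Char
  | [] => []
  | c :: rest =>
    nfClassB c :: nfTokens (rest.dropWhile (fun d => nfClassB d == nfClassB c))
termination_by l => l.length
decreasing_by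
  simp only [List.length_cons]
  exact Nat.lt_succ_of_le (List.length_dropWhile_le _ _)

def normalized_fingerprint_alt (value : String) : String :=
  String.mk (nfTokens value.toList)

-- ===== PRECONDITION & SPEC =====
def Spec_normalized_fingerprint (value : String) (out : String) : Prop := out = normalized_fingerprint_alt value
instance (value : String) (out : String) : Decidable (Spec_normalized_fingerprint value out) := by unfold Spec_normalized_fingerprint; infer_instance

-- ===== CLAIM (what is proved, stated in full; the proofs are below) =====
def Claim_equal_normalized_fingerprint : Prop := ∀ (value : String), Dom_normalized_fingerprint value → Spec_normalized_fingerprint value (normalized_fingerprint value)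

-- ===== LEMMAS AND PROOFS =====
-- A's classification, factored out to state the lemmas.
def nfClassifyA (c : Char) : Char :=
  if PySem.Chars.isdigit c then 'D'
  else if PySem.Chars.isalpha c then 'L'
  else if PySem.Chars.isspace c then '_' else c

-- On the ASCII domain the two classifications agree.
theorem nfCls_eq (c : Char) (h : pvDomChar c = true) : nfClassifyA c = nfClassB c := by
  have hn : (32 ≤ c.toNat ∧ c.toNat ≤ 126) ∨ c.toNat = 9 ∨ c.toNat = 10 ∨ c.toNat = 13 := by
    have := h
    simp [pvDomChar, Bool.or_eq_true, Bool.and_eq_true] at this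
    tauto
  have hc : c = Char.ofNat c.toNat := (Char.ofNat_toNat c).symm
  rcases hn with ⟨h1, h2⟩ | h | h | h
  · interval_cases hk : c.toNat <;> (rw [hc]; decide)
  all_goals (rw [hc, h]; decide)

-- drop-while-equal-to-previous form of run collapsing, used to state both invariants
def nfDropPrev : List Char → Char → List Char
  | [], _ => []
  | c :: rest, p => if c = p then nfDropPrev rest p else c :: nfDropPrev rest c

theorem nfLoopA_cons (c : Char) (rest acc : List Char) (prev : Option Char) :
    nfLoopA (c :: rest) acc prev =
      if some (nfClassifyA c) ≠ prev then nfLoopA rest (acc ++ [nfClassifyA c]) (some (nfClassifyA c))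
      else nfLoopA rest acc prev := by
  simp [nfLoopA, nfClassifyA]

theorem nfLoopA_invariant (l : List Char) (acc : List Char) (p : Char) :
    nfLoopA l acc (some p) = acc ++ nfDropPrev (l.map nfClassifyA) p := by
  induction l generalizing acc p with
  | nil => simp [nfLoopA, nfDropPrev]
  | cons c rest ih =>
    rw [nfLoopA_cons, List.map_cons]
    by_cases h : nfClassifyA c = p
    · rw [if_neg (by simp [h]), ih, nfDropPrev, if_pos h]
    · rw [if_pos (by simp [h]), ih, nfDropPrev, if_neg h, List.append_assoc]
      rfl

theorem nfTokens_dropWhile (l : List Char) (p : Char) :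
    nfTokens (l.dropWhile (fun d => nfClassB d == p)) = nfDropPrev (l.map nfClassB) p := by
  induction l generalizing p with
  | nil => simp [nfTokens, nfDropPrev]
  | cons c rest ih =>
    by_cases h : nfClassB c = p
    · rw [List.dropWhile_cons_of_pos (by simp [h]), List.map_cons, nfDropPrev, if_pos h, ih]
    · rw [List.dropWhile_cons_of_neg (by simp [h]), nfTokens, List.map_cons, nfDropPrev,
        if_neg h, ih]

-- ===== VERDICT (by name: the statement is the Claim_ definition above) =====
theorem normalized_fingerprint_spec : Claim_equal_normalized_fingerprint := by
  intro value hdom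
  show normalized_fingerprint value = normalized_fingerprint_alt value
  unfold normalized_fingerprint normalized_fingerprint_alt
  have hall : ∀ d ∈ value.toList, pvDomChar d = true := by
    simpa [Dom_normalized_fingerprint, pvDomStr, List.all_eq_true] using hdom
  cases hl : value.toList with
  | nil => simp [nfTokens]; rfl
  | cons c rest =>
    have hc : pvDomChar c = true := hall c (by rw [hl]; exact List.mem_cons_self ..)
    have hrest : rest.map nfClassifyA = rest.map nfClassB :=
      List.map_congr_left fun d hd => nfCls_eq d (hall d (by rw [hl]; exact List.mem_cons_of_mem _ hd))
    rw [if_neg (by simp)]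
    rw [nfLoopA_cons, if_pos (by simp), nfLoopA_invariant, hrest, nfCls_eq c hc,
      nfTokens, nfTokens_dropWhile]
    rfl
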